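-- pv_equiv track=rewrite | github.com/phillipus85/Py-Ideas | Concepts/cypher/new_test.py | beaufort_decrypt_colstream_rows
-- ===== SOURCE A (Python) =====
-- ALPHABET = "ABCDEFGHIJKLMNOPQRSTUVWXYZ"
--
-- char_to_idx = {c: i for i, c in enumerate(ALPHABET)}
--
-- def beaufort_decrypt_stream(ciphertext: str, key: str) -> str:
--     key_idx = [char_to_idx[k] for k in key.upper()]
--     out = []
--     ki = 0
--     for ch in ciphertext.upper():
--         if ch in char_to_idx:
--             cidx = char_to_idx[ch]
--             pidx = (key_idx[ki % len(key_idx)] - cidx) % 26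
--             out.append(ALPHABET[pidx])
--             ki += 1
--         else:
--             out.append(ch)
--     return ''.join(out)
--
-- def beaufort_decrypt_colstream_rows(rows, key):
--     nrows = len(rows)
--     ncols = len(rows[0])
--     stream = ''.join(rows[r][c] for c in range(ncols) for r in range(nrows))
--     dec = beaufort_decrypt_stream(stream, key)
--     cols = [dec[i*nrows:(i+1)*nrows] for i in range(ncols)]
--     rows_out = [''.join(cols[c][r] for c in range(ncols))
--                 for r in range(nrows)]
--     return rows_out
-- ===== SOURCE B (Python) =====
-- def beaufort_decrypt_colstream_rows(rows, key):
--     nrows = len(rows)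
--     ncols = len(rows[0])
--     kis = [ord(k) - 65 for k in key.upper()]
--     ki = 0
--     cols = []
--     for c in range(ncols):
--         col = []
--         for r in range(nrows):
--             ch = rows[r][c].upper()
--             if 'A' <= ch <= 'Z':
--                 ch = chr(65 + (kis[ki % len(kis)] - (ord(ch) - 65)) % 26)
--                 ki += 1
--             col.append(ch)
--         cols.append(col)
--     return [''.join(col[r] for col in cols) for r in range(nrows)]
-- ===== Notes on version B (the rewrite author's own statement) =====
-- stated objective: simpler
-- what changed: B fuses A's four phases (build column-major stream string, helper-decrypt it, slice back into columns, transpose) into one nested loop that decrypts each grid cell directly into its column using ord-arithmetic instead of a char->index dict, then joins rows.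
import Mathlib
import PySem

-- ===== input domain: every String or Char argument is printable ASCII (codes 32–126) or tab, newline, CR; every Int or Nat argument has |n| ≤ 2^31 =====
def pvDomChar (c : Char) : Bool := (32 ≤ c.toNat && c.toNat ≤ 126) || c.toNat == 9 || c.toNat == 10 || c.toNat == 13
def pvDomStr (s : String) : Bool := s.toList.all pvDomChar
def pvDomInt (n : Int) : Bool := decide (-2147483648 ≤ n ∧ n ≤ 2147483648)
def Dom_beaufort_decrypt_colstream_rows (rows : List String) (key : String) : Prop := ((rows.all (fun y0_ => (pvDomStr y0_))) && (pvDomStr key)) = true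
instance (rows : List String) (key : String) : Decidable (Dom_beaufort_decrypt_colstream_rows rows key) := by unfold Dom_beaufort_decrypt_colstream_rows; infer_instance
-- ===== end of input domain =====

-- B fuses A's stream-build / helper-decrypt / slice / transpose pipeline into one nested
-- column-major loop that decrypts each cell directly into its column (ord arithmetic instead
-- of the char->index dict); objective: a simpler decomposition, same asymptotic cost.

-- ===== PORT A =====
-- ALPHABET = "ABCDEFGHIJKLMNOPQRSTUVWXYZ"
def pvAlphabet : List Char := "ABCDEFGHIJKLMNOPQRSTUVWXYZ".toList

-- char_to_idx = {c: i for i, c in enumerate(ALPHABET)}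
def pvCharToIdx : PySem.Dict Char Int :=
  (PySem.List.enumerate pvAlphabet 0).foldl (fun d p => d.insert p.2 p.1) PySem.Dict.empty

-- def beaufort_decrypt_stream(ciphertext, key); the KeyError / IndexError / ZeroDivisionError
-- paths (non-alphabetic key, empty key meeting a letter) are excluded by Pre_, so the getD
-- defaults are never observed on admitted inputs.
def pvDecryptStream (ciphertext : String) (key : String) : String :=
  let key_idx : List Int := (PySem.Str.upper key).toList.map (fun k => pvCharToIdx.getD k 0)
  let res := (PySem.Str.upper ciphertext).toList.foldl
    (fun (s : List Char × Int) ch =>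
      if pvCharToIdx.contains ch then
        (s.1 ++ [PySem.List.pyGetD pvAlphabet
          (PySem.Int.mod (PySem.List.pyGetD key_idx (PySem.Int.mod s.2 (key_idx.length : Int)) 0
            - pvCharToIdx.getD ch 0) 26) ' '], s.2 + 1)
      else (s.1 ++ [ch], s.2)) ([], (0 : Int))
  String.ofList res.1

-- rows[0] on empty rows and rows[r][c] on a too-short row raise IndexError in Python
-- (excluded by Pre_); the pyGetD defaults stand in for those raising lookups only.
def beaufort_decrypt_colstream_rows (rows : List String) (key : String) : List String :=
  let nrows : Int := (rows.length : Int)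
  let ncols : Int := PySem.Str.len (PySem.List.pyGetD rows 0 "")
  let stream : List Char := (PySem.List.pyRange 0 ncols 1).flatMap (fun c =>
    (PySem.List.pyRange 0 nrows 1).map (fun r =>
      PySem.List.pyGetD (PySem.List.pyGetD rows r "").toList c ' '))
  let dec : List Char := (pvDecryptStream (String.ofList stream) key).toList
  let cols : List (List Char) := (PySem.List.pyRange 0 ncols 1).map (fun i =>
    PySem.List.slice dec (some (i * nrows)) (some ((i + 1) * nrows)))
  (PySem.List.pyRange 0 nrows 1).map (fun r =>
    String.ofList ((PySem.List.pyRange 0 ncols 1).map (fun c =>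
      PySem.List.pyGetD (PySem.List.pyGetD cols c []) r ' ')))

-- ===== PORT B =====
-- single fused pass: column-major traversal decrypting each cell into its column, then join rows
-- (rows[r][c].upper() on a 1-char string is upperChar; chr(65+p) with 0 ≤ p < 26 is Char.ofNat)
def beaufort_decrypt_colstream_rows_alt (rows : List String) (key : String) : List String :=
  let nrows : Int := (rows.length : Int)
  let ncols : Int := PySem.Str.len (PySem.List.pyGetD rows 0 "")
  let kis : List Int := (PySem.Str.upper key).toList.map (fun k => (k.toNat : Int) - 65)
  let st := (PySem.List.pyRange 0 ncols 1).foldl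
    (fun (s : List (List Char) × Int) c =>
      let t := (PySem.List.pyRange 0 nrows 1).foldl
        (fun (t : List Char × Int) r =>
          let ch := PySem.Chars.upperChar (PySem.List.pyGetD (PySem.List.pyGetD rows r "").toList c ' ')
          if 'A' ≤ ch ∧ ch ≤ 'Z' then
            (t.1 ++ [Char.ofNat (65 + PySem.Int.mod
              (PySem.List.pyGetD kis (PySem.Int.mod t.2 (kis.length : Int)) 0
                - ((ch.toNat : Int) - 65)) 26).toNat], t.2 + 1)
          else (t.1 ++ [ch], t.2)) ([], s.2)
      (s.1 ++ [t.1], t.2)) ([], (0 : Int))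
  (PySem.List.pyRange 0 nrows 1).map (fun r =>
    String.ofList (st.1.map (fun col => PySem.List.pyGetD col r ' ')))

-- ===== PRECONDITION & SPEC =====
-- Pre_ admits exactly the inputs where Python A returns: rows non-empty (else rows[0]
-- IndexError), no row shorter than rows[0] (else rows[r][c] IndexError), key all-alphabetic
-- (else KeyError on char_to_idx[k]), and an empty key only when no letter occurs in the
-- first len(rows[0]) columns of any row (else ZeroDivisionError from ki % 0).
def Pre_beaufort_decrypt_colstream_rows (rows : List String) (key : String) : Prop :=
  rows ≠ [] ∧
  (rows.all (fun s => decide ((rows.headD "").toList.length ≤ s.toList.length)) = true) ∧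
  (key = "" ∨ PySem.Str.strIsalpha key = true) ∧
  (key ≠ "" ∨ rows.all (fun s =>
    (s.toList.take (rows.headD "").toList.length).all (fun c => !(PySem.Chars.isalpha c))) = true)
instance (rows : List String) (key : String) : Decidable (Pre_beaufort_decrypt_colstream_rows rows key) := by
  unfold Pre_beaufort_decrypt_colstream_rows; infer_instance

def pvWitness_beaufort_decrypt_colstream_rows : List String × String := (["ab", "cd"], "K")

def Spec_beaufort_decrypt_colstream_rows (rows : List String) (key : String) (out : List String) : Prop := out = beaufort_decrypt_colstream_rows_alt rows key
instance (rows : List String) (key : String) (out : List String) : Decidable (Spec_beaufort_decrypt_colstream_rows rows key out) := by unfold Spec_beaufort_decrypt_colstream_rows; infer_instance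

-- ===== CLAIM (what is proved, stated in full; the proofs are below) =====
def Claim_equal_beaufort_decrypt_colstream_rows : Prop := ∀ (rows : List String) (key : String), Dom_beaufort_decrypt_colstream_rows rows key → Pre_beaufort_decrypt_colstream_rows rows key → Spec_beaufort_decrypt_colstream_rows rows key (beaufort_decrypt_colstream_rows rows key)

-- ===== LEMMAS AND PROOFS =====

-- the per-(already-uppercased-)char decryption step with key index list kidx
def pvStep (kidx : List Int) (t : List Char × Int) (ch : Char) : List Char × Int :=
  if 'A' ≤ ch ∧ ch ≤ 'Z' then
    (t.1 ++ [Char.ofNat (65 + PySem.Int.mod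
      (PySem.List.pyGetD kidx (PySem.Int.mod t.2 (kidx.length : Int)) 0
        - ((ch.toNat : Int) - 65)) 26).toNat], t.2 + 1)
  else (t.1 ++ [ch], t.2)

-- decrypt a list of columns, threading the key cursor, keeping the column structure
def pvDecCols (kidx : List Int) (k : Int) : List (List Char) → (List (List Char) × Int)
  | [] => ([], k)
  | col :: rest =>
    let t := col.foldl (pvStep kidx) ([], k)
    let u := pvDecCols kidx t.2 rest
    (t.1 :: u.1, u.2)

-- the uppercased columns of the grid (first len(rows[0]) columns, column-major)
def pvColsRaw (rows : List String) : List (List Char) :=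
  (PySem.List.pyRange 0 (((PySem.List.pyGetD rows 0 "").toList.length : Int)) 1).map
    (fun c => rows.map (fun s => PySem.Chars.upperChar (PySem.List.pyGetD s.toList c ' ')))

-- common normal form of both ports, given the key index list
def pvOut (rows : List String) (kidx : List Int) : List String :=
  let pieces := (pvDecCols kidx 0 (pvColsRaw rows)).1
  (PySem.List.pyRange 0 ((rows.length : Int)) 1).map
    (fun r => String.ofList (pieces.map (fun col => PySem.List.pyGetD col r ' ')))

lemma pvCharToIdx_eq : pvCharToIdx = PySem.Dict.mk
    [('A',0),('B',1),('C',2),('D',3),('E',4),('F',5),('G',6),('H',7),('I',8),('J',9),('K',10),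
     ('L',11),('M',12),('N',13),('O',14),('P',15),('Q',16),('R',17),('S',18),('T',19),('U',20),
     ('V',21),('W',22),('X',23),('Y',24),('Z',25)] := by rfl

lemma pvCharLe (a u : Char) : (a ≤ u) ↔ a.toNat ≤ u.toNat := by
  rw [Char.le_def, UInt32.le_iff_toNat_le]; rfl

lemma pvCharEq (u : Char) (n : Nat) (hn : u.toNat = n) : u = Char.ofNat n := by
  rw [← hn, Char.ofNat_toNat]

lemma pvCharToIdx_get? (u : Char) :
    pvCharToIdx.get? u = if 'A' ≤ u ∧ u ≤ 'Z' then some ((u.toNat : Int) - 65) else none := by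
  by_cases h : 'A' ≤ u ∧ u ≤ 'Z'
  · rw [if_pos h]
    have h65 : 65 ≤ u.toNat := (pvCharLe 'A' u).1 h.1
    have h90 : u.toNat ≤ 90 := (pvCharLe u 'Z').1 h.2
    interval_cases hu : u.toNat <;> rw [pvCharEq u _ hu] <;> decide
  · rw [if_neg h]
    rw [PySem.Dict.get?_eq_none_iff_contains, pvCharToIdx_eq, PySem.Dict.contains_mk]
    rw [List.any_eq_false]
    intro p hp
    fin_cases hp <;>
      (intro he; rw [beq_iff_eq] at he; rw [← he] at h; exact h (by decide))

lemma pvCharToIdx_contains (u : Char) :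
    pvCharToIdx.contains u = decide ('A' ≤ u ∧ u ≤ 'Z') := by
  rw [PySem.Dict.contains_eq_isSome_get?, pvCharToIdx_get?]
  by_cases h : 'A' ≤ u ∧ u ≤ 'Z' <;> simp [h]

lemma pvCharToIdx_getD (u : Char) (h : 'A' ≤ u ∧ u ≤ 'Z') :
    pvCharToIdx.getD u 0 = (u.toNat : Int) - 65 := by
  rw [PySem.Dict.getD_eq_get?_getD, pvCharToIdx_get?, if_pos h]; rfl

lemma pvAlphabet_get (p : Int) (h0 : 0 ≤ p) (h1 : p < 26) :
    PySem.List.pyGetD pvAlphabet p ' ' = Char.ofNat (65 + p).toNat := by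
  obtain ⟨n, rfl⟩ := Int.eq_ofNat_of_zero_le h0
  have hn : n < 26 := by exact_mod_cast h1
  rw [PySem.List.pyGetD_natCast]
  interval_cases n <;> rfl

lemma pvUpper_alpha (k : Char) (h : PySem.Chars.isalpha k = true) :
    'A' ≤ PySem.Chars.upperChar k ∧ PySem.Chars.upperChar k ≤ 'Z' := by
  simp only [PySem.Chars.isalpha, Bool.or_eq_true, PySem.Chars.isupper, PySem.Chars.islower,
    Bool.and_eq_true, decide_eq_true_eq] at h
  rw [PySem.Chars.upperChar]
  split_ifs with hl
  · simp only [PySem.Chars.islower, Bool.and_eq_true, decide_eq_true_eq] at hl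
    have h97 : 97 ≤ k.toNat := (pvCharLe 'a' k).1 hl.1
    have h122 : k.toNat ≤ 122 := (pvCharLe k 'z').1 hl.2
    have hv : (Char.ofNat (k.toNat - 32)).toNat = k.toNat - 32 := by
      rw [Char.toNat_ofNat, if_pos (by simp [Nat.isValidChar]; omega)]
    have hA : 'A'.toNat = 65 := rfl
    have hZ : 'Z'.toNat = 90 := rfl
    exact ⟨(pvCharLe _ _).2 (by omega), (pvCharLe _ _).2 (by omega)⟩
  · rcases h with h | h
    · exact h
    · exact absurd (show PySem.Chars.islower k = true by
        simp only [PySem.Chars.islower, Bool.and_eq_true, decide_eq_true_eq]; exact h) hl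

-- A's fold body is exactly pvStep
lemma pvStepA_eq (kidx : List Int) (t : List Char × Int) (ch : Char) :
    (if pvCharToIdx.contains ch then
        (t.1 ++ [PySem.List.pyGetD pvAlphabet
          (PySem.Int.mod (PySem.List.pyGetD kidx (PySem.Int.mod t.2 (kidx.length : Int)) 0
            - pvCharToIdx.getD ch 0) 26) ' '], t.2 + 1)
      else (t.1 ++ [ch], t.2)) = pvStep kidx t ch := by
  rw [pvStep, pvCharToIdx_contains]
  by_cases h : 'A' ≤ ch ∧ ch ≤ 'Z'
  · rw [pvCharToIdx_getD ch h,
      pvAlphabet_get _ (PySem.Int.mod_nonneg _ (by norm_num)) (PySem.Int.mod_lt _ (by norm_num))]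
    simp [h]
  · simp [h]

lemma pvStep_single (kidx : List Int) (a : List Char) (k : Int) (ch : Char) :
    pvStep kidx (a, k) ch
      = (a ++ (pvStep kidx ([], k) ch).1, (pvStep kidx ([], k) ch).2) := by
  rw [pvStep, pvStep]; split_ifs <;> simp

lemma pvStep_factor (kidx : List Int) (col : List Char) (a : List Char) (k : Int) :
    col.foldl (pvStep kidx) (a, k)
      = (a ++ (col.foldl (pvStep kidx) ([], k)).1, (col.foldl (pvStep kidx) ([], k)).2) := by
  induction col generalizing a k with
  | nil => simp
  | cons c cs ih =>
    simp only [List.foldl_cons]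
    rw [pvStep_single, ih]
    conv_rhs => rw [← Prod.mk.eta (p := pvStep kidx ([], k) c), ih]
    simp [List.append_assoc]

lemma pvStep_len (kidx : List Int) (col : List Char) (a : List Char) (k : Int) :
    (col.foldl (pvStep kidx) (a, k)).1.length = a.length + col.length := by
  induction col generalizing a k with
  | nil => simp
  | cons c cs ih =>
    simp only [List.foldl_cons]
    have h1 : (pvStep kidx (a, k) c).1.length = a.length + 1 := by
      rw [pvStep]; split_ifs <;> simp
    rw [← Prod.mk.eta (p := pvStep kidx (a, k) c), ih, h1, List.length_cons]
    omega

-- A's flat fold over the concatenated columns = flatten of pvDecCols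
lemma pvFlat_eq (kidx : List Int) (l : List (List Char)) (a : List Char) (k : Int) :
    l.foldl (fun s col => col.foldl (pvStep kidx) s) (a, k)
      = (a ++ (pvDecCols kidx k l).1.flatten, (pvDecCols kidx k l).2) := by
  induction l generalizing a k with
  | nil => simp [pvDecCols]
  | cons col rest ih =>
    simp only [List.foldl_cons]
    rw [pvStep_factor, ih]
    simp [pvDecCols, List.append_assoc]

-- B's outer fold = pvDecCols with a running prefix
lemma pvB_fold_eq (kidx : List Int) (l : List (List Char)) (b : List (List Char)) (k : Int) :
    l.foldl (fun (s : List (List Char) × Int) col =>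
        (s.1 ++ [(col.foldl (pvStep kidx) ([], s.2)).1], (col.foldl (pvStep kidx) ([], s.2)).2)) (b, k)
      = (b ++ (pvDecCols kidx k l).1, (pvDecCols kidx k l).2) := by
  induction l generalizing b k with
  | nil => simp [pvDecCols]
  | cons col rest ih =>
    simp only [List.foldl_cons]
    rw [ih]
    simp [pvDecCols]

lemma pvDecCols_length (kidx : List Int) (k : Int) (l : List (List Char)) :
    (pvDecCols kidx k l).1.length = l.length := by
  induction l generalizing k with
  | nil => simp [pvDecCols]
  | cons col rest ih => simp [pvDecCols, ih]

lemma pvDecCols_piece_len (kidx : List Int) (k : Int) (l : List (List Char)) (n : Nat)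
    (h : ∀ col ∈ l, col.length = n) :
    ∀ x ∈ (pvDecCols kidx k l).1, x.length = n := by
  induction l generalizing k with
  | nil => simp [pvDecCols]
  | cons col rest ih =>
    intro x hx
    simp only [pvDecCols, List.mem_cons] at hx
    rcases hx with rfl | hx
    · rw [pvStep_len]
      simp [h col (by simp)]
    · exact ih _ (fun c hc => h c (by simp [hc])) x hx

-- slicing the flatten of equal-length pieces returns piece i
lemma pvSlice_flatten (L : List (List Char)) (n : Nat) (h : ∀ x ∈ L, x.length = n)
    (i : Nat) (hi : i < L.length) :
    PySem.List.slice L.flatten (some ((i * n : Nat) : Int)) (some (((i + 1) * n : Nat) : Int))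
      = L[i] := by
  induction L generalizing i with
  | nil => simp at hi
  | cons x Ls ih =>
    have hx : x.length = n := h x (by simp)
    cases i with
    | zero =>
      rw [PySem.List.slice_natCast]
      simp only [Nat.zero_mul, List.drop_zero, Nat.sub_zero, List.flatten_cons]
      rw [show (0 + 1) * n = n from by omega, List.take_left' hx]
      simp
    | succ j =>
      have e1 : (j + 1) * n = n + j * n := by ring
      have e2 : (j + 1 + 1) * n = n + (j + 1) * n := by ring
      rw [PySem.List.slice_natCast, List.flatten_cons]
      rw [show (j + 1 + 1) * n - (j + 1) * n = n from by omega]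
      rw [show (j + 1) * n = x.length + j * n from by omega, ← List.drop_drop,
        List.drop_left' rfl]
      have := ih (fun c hc => h c (by simp [hc])) j (by simpa using hi)
      rw [PySem.List.slice_natCast] at this
      rw [show (j + 1) * n - j * n = n from by omega] at this
      simpa using this

lemma pvChars_upper_eq (cs : List Char) : PySem.Chars.upper cs = cs.map PySem.Chars.upperChar := rfl

-- PORT A in normal form
set_option maxHeartbeats 2000000 in
lemma pvA_norm (rows : List String) (key : String) :
    beaufort_decrypt_colstream_rows rows key
      = pvOut rows ((PySem.Str.upper key).toList.map (fun k => pvCharToIdx.getD k 0)) := by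
  have hm : PySem.Str.len (PySem.List.pyGetD rows 0 "")
      = (((PySem.List.pyGetD rows 0 "").toList.length : Int)) := by simp
  have hcol : ∀ c : Int,
      (PySem.List.pyRange 0 ((rows.length : Int)) 1).map
        (fun r => PySem.List.pyGetD (PySem.List.pyGetD rows r "").toList c ' ')
      = rows.map (fun s => PySem.List.pyGetD s.toList c ' ') := by
    intro c
    have h2 := PySem.List.map_pyGetD_pyRange_zero' rows ""
    calc (PySem.List.pyRange 0 ((rows.length : Int)) 1).map
          (fun r => PySem.List.pyGetD (PySem.List.pyGetD rows r "").toList c ' ')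
        = ((PySem.List.pyRange 0 ((rows.length : Int)) 1).map
            (fun j => PySem.List.pyGetD rows j "")).map (fun s => PySem.List.pyGetD s.toList c ' ') := by
          rw [List.map_map]; rfl
      _ = rows.map (fun s => PySem.List.pyGetD s.toList c ' ') := by rw [h2]
  simp only [beaufort_decrypt_colstream_rows, pvDecryptStream]
  simp only [String.toList_ofList, PySem.Str.toList_upper, pvChars_upper_eq]
  simp only [pvStepA_eq]
  simp only [hcol, hm]
  simp only [List.flatMap_def, List.map_flatten, List.map_map, Function.comp_def]
  simp only [List.foldl_flatten]
  simp only [pvFlat_eq]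
  simp only [List.nil_append]
  simp only [show (List.map (fun c => List.map (fun s => PySem.Chars.upperChar (PySem.List.pyGetD s.toList c ' ')) rows)
      (PySem.List.pyRange 0 (((PySem.List.pyGetD rows 0 "").toList.length) : Int) 1)) = pvColsRaw rows from rfl]
  have hLlen : ∀ col ∈ pvColsRaw rows, col.length = rows.length := by
    intro col hc
    simp only [pvColsRaw, List.mem_map] at hc
    obtain ⟨c, -, rfl⟩ := hc
    simp
  have hpl := pvDecCols_piece_len (List.map (fun x => pvCharToIdx.getD (PySem.Chars.upperChar x) 0) key.toList) 0 (pvColsRaw rows) rows.length hLlen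
  have hplen : (pvDecCols (List.map (fun x => pvCharToIdx.getD (PySem.Chars.upperChar x) 0) key.toList) 0 (pvColsRaw rows)).1.length = ((PySem.List.pyGetD rows 0 "").toList.length) := by
    rw [pvDecCols_length, pvColsRaw, List.length_map, PySem.List.pyRange_zero_natCast,
      List.length_map, List.length_range]
  have hcolsA : (PySem.List.pyRange 0 (((PySem.List.pyGetD rows 0 "").toList.length) : Int) 1).map
      (fun i => PySem.List.slice (pvDecCols (List.map (fun x => pvCharToIdx.getD (PySem.Chars.upperChar x) 0) key.toList) 0 (pvColsRaw rows)).1.flatten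
        (some (i * (rows.length : Int))) (some ((i + 1) * (rows.length : Int))))
      = (pvDecCols (List.map (fun x => pvCharToIdx.getD (PySem.Chars.upperChar x) 0) key.toList) 0 (pvColsRaw rows)).1 := by
    apply List.ext_getElem
    · rw [List.length_map, PySem.List.pyRange_zero_natCast, List.length_map, List.length_range, hplen]
    · intro i h1 h2
      simp only [PySem.List.pyRange_zero_natCast, List.map_map, List.getElem_map,
        List.getElem_range, Function.comp_apply]
      rw [show ((i : Nat) : Int) * ((rows.length : Nat) : Int) = ((i * rows.length : Nat) : Int) from by
            push_cast; ring,
          show (((i : Nat) : Int) + 1) * ((rows.length : Nat) : Int) = (((i + 1) * rows.length : Nat) : Int) from by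
            push_cast; ring]
      exact pvSlice_flatten _ rows.length hpl i h2
  simp only [hcolsA]
  have h3 := PySem.List.map_pyGetD_pyRange_zero' (pvDecCols (List.map (fun x => pvCharToIdx.getD (PySem.Chars.upperChar x) 0) key.toList) 0 (pvColsRaw rows)).1 ([] : List Char)
  rw [hplen] at h3
  have hrow : ∀ r : Int, (PySem.List.pyRange 0 (((PySem.List.pyGetD rows 0 "").toList.length) : Int) 1).map
      (fun c => PySem.List.pyGetD (PySem.List.pyGetD (pvDecCols (List.map (fun x => pvCharToIdx.getD (PySem.Chars.upperChar x) 0) key.toList) 0 (pvColsRaw rows)).1 c []) r ' ')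
      = (pvDecCols (List.map (fun x => pvCharToIdx.getD (PySem.Chars.upperChar x) 0) key.toList) 0 (pvColsRaw rows)).1.map (fun col => PySem.List.pyGetD col r ' ') := by
    intro r
    calc (PySem.List.pyRange 0 (((PySem.List.pyGetD rows 0 "").toList.length) : Int) 1).map
          (fun c => PySem.List.pyGetD (PySem.List.pyGetD (pvDecCols (List.map (fun x => pvCharToIdx.getD (PySem.Chars.upperChar x) 0) key.toList) 0 (pvColsRaw rows)).1 c []) r ' ')
        = ((PySem.List.pyRange 0 (((PySem.List.pyGetD rows 0 "").toList.length) : Int) 1).map (fun j => PySem.List.pyGetD (pvDecCols (List.map (fun x => pvCharToIdx.getD (PySem.Chars.upperChar x) 0) key.toList) 0 (pvColsRaw rows)).1 j [])).map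
            (fun col => PySem.List.pyGetD col r ' ') := by
          rw [List.map_map]; rfl
      _ = (pvDecCols (List.map (fun x => pvCharToIdx.getD (PySem.Chars.upperChar x) 0) key.toList) 0 (pvColsRaw rows)).1.map (fun col => PySem.List.pyGetD col r ' ') := by rw [h3]
  simp only [hrow]
  rfl



lemma pvStep_def (kidx : List Int) (t : List Char × Int) (ch : Char) :
    (if 'A' ≤ ch ∧ ch ≤ 'Z' then
      (t.1 ++ [Char.ofNat (65 + PySem.Int.mod
        (PySem.List.pyGetD kidx (PySem.Int.mod t.2 (kidx.length : Int)) 0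
          - ((ch.toNat : Int) - 65)) 26).toNat], t.2 + 1)
    else (t.1 ++ [ch], t.2)) = pvStep kidx t ch := rfl

-- PORT B in normal form
set_option maxHeartbeats 2000000 in
lemma pvB_norm (rows : List String) (key : String) :
    beaufort_decrypt_colstream_rows_alt rows key
      = pvOut rows ((PySem.Str.upper key).toList.map (fun k => ((k.toNat : Int) - 65))) := by
  have hm : PySem.Str.len (PySem.List.pyGetD rows 0 "")
      = (((PySem.List.pyGetD rows 0 "").toList.length : Int)) := by simp
  simp only [beaufort_decrypt_colstream_rows_alt]
  simp only [pvStep_def]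
  have hinner : ∀ (c k : Int),
      (PySem.List.pyRange 0 ((rows.length : Int)) 1).foldl
        (fun (t : List Char × Int) r => pvStep ((PySem.Str.upper key).toList.map (fun k => ((k.toNat : Int) - 65))) t
          (PySem.Chars.upperChar (PySem.List.pyGetD (PySem.List.pyGetD rows r "").toList c ' ')))
        ([], k)
      = (rows.map (fun s => PySem.Chars.upperChar (PySem.List.pyGetD s.toList c ' '))).foldl
          (pvStep ((PySem.Str.upper key).toList.map (fun k => ((k.toNat : Int) - 65)))) ([], k) := by
    intro c k
    rw [PySem.List.foldl_pyRange_zero_pyGetD' rows ""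
      (fun t s => pvStep ((PySem.Str.upper key).toList.map (fun k => ((k.toNat : Int) - 65))) t
        (PySem.Chars.upperChar (PySem.List.pyGetD s.toList c ' '))) ([], k)]
    exact (List.foldl_map).symm
  simp only [hinner, hm]
  have hconv : (PySem.List.pyRange 0 (((PySem.List.pyGetD rows 0 "").toList.length : Int)) 1).foldl
      (fun (s : List (List Char) × Int) c =>
        (s.1 ++ [((rows.map (fun st => PySem.Chars.upperChar (PySem.List.pyGetD st.toList c ' '))).foldl
            (pvStep ((PySem.Str.upper key).toList.map (fun k => ((k.toNat : Int) - 65)))) ([], s.2)).1],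
         ((rows.map (fun st => PySem.Chars.upperChar (PySem.List.pyGetD st.toList c ' '))).foldl
            (pvStep ((PySem.Str.upper key).toList.map (fun k => ((k.toNat : Int) - 65)))) ([], s.2)).2))
      ([], (0 : Int))
      = (pvColsRaw rows).foldl
        (fun (s : List (List Char) × Int) col =>
          (s.1 ++ [(col.foldl (pvStep ((PySem.Str.upper key).toList.map (fun k => ((k.toNat : Int) - 65)))) ([], s.2)).1],
           (col.foldl (pvStep ((PySem.Str.upper key).toList.map (fun k => ((k.toNat : Int) - 65)))) ([], s.2)).2))
        ([], (0 : Int)) := by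
    rw [pvColsRaw, List.foldl_map]
  rw [hconv, pvB_fold_eq]
  simp only [List.nil_append]
  rfl


-- under Pre_, A's dict-built key index list is B's ord-based one
lemma pvKey_eq (key : String) (h : ∀ k ∈ key.toList, PySem.Chars.isalpha k = true) :
    (PySem.Str.upper key).toList.map (fun k => pvCharToIdx.getD k 0)
      = (PySem.Str.upper key).toList.map (fun k => ((k.toNat : Int) - 65)) := by
  apply List.map_congr_left
  intro u hu
  rw [PySem.Str.toList_upper, pvChars_upper_eq] at hu
  obtain ⟨k0, hk0, rfl⟩ := List.mem_map.1 hu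
  exact pvCharToIdx_getD _ (pvUpper_alpha k0 (h k0 hk0))

-- ===== VERDICT (by name: the statement is the Claim_ definition above) =====
theorem beaufort_decrypt_colstream_rows_spec : Claim_equal_beaufort_decrypt_colstream_rows := by
  intro rows key _hdom hpre
  unfold Spec_beaufort_decrypt_colstream_rows
  have halpha : ∀ k ∈ key.toList, PySem.Chars.isalpha k = true := by
    rcases hpre.2.2.1 with h | h
    · subst h; simp
    · simp only [PySem.Str.strIsalpha_eq, PySem.Chars.strIsalpha, Bool.and_eq_true,
        List.all_eq_true] at h
      exact h.2
  rw [pvA_norm, pvB_norm, pvKey_eq key halpha]
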